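-- pv_equiv track=rewrite | github.com/EhsanShahbazii/Quera-Problem-Solutions | Technology/Baalin/calculator.py | calculate_floor
-- ===== SOURCE A (Python) =====
-- def calculate_floor(string):
--     now = 0
--     for i, c in enumerate(string):
--         if (c == "U"):
--             now = now + 1
--         else:
--             now = now - 1
--     return now
-- ===== SOURCE B (Python) =====
-- def calculate_floor(string):
--     return 2 * string.count("U") - len(string)
-- ===== Notes on version B (the rewrite author's own statement) =====
-- stated objective: simpler
-- what changed: Replaces the character-by-character loop with branching accumulator by a closed-form arithmetic identity 2*count('U') - len(s), since each U contributes +1 and each other char -1.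
import Mathlib
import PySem

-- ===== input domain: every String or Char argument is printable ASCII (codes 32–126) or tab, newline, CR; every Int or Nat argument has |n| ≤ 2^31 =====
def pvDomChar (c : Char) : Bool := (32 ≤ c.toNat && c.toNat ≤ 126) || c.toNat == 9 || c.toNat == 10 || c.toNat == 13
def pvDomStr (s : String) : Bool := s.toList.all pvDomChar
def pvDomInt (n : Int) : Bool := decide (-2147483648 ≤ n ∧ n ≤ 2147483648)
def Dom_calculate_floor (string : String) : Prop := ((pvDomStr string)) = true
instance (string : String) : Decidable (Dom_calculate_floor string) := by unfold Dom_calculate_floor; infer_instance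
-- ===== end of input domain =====

-- B replaces A's per-character loop with the closed form 2*count('U') - len; equivalence is exact and total.

-- ===== PORT A =====
-- literal port of A's loop: 'now' starts at 0, +1 on 'U', -1 otherwise (the enumerate index is unused)
def calculate_floor (string : String) : Int :=
  string.toList.foldl (fun now c => if c == 'U' then now + 1 else now - 1) 0

-- ===== PORT B =====
-- literal port of B: 2 * string.count("U") - len(string)
def calculate_floor_alt (string : String) : Int :=
  2 * (PySem.Str.count string "U" : Int) - PySem.Str.len string

-- ===== PRECONDITION & SPEC =====
def Spec_calculate_floor (string : String) (out : Int) : Prop := out = calculate_floor_alt string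
instance (string : String) (out : Int) : Decidable (Spec_calculate_floor string out) := by unfold Spec_calculate_floor; infer_instance

-- ===== CLAIM (what is proved, stated in full; the proofs are below) =====
def Claim_equal_calculate_floor : Prop := ∀ (string : String), Dom_calculate_floor string → Spec_calculate_floor string (calculate_floor string)

-- ===== LEMMAS AND PROOFS =====

-- counting the single-character substring "U" is counting the character 'U'
theorem chars_count_go_single (c : Char) (fuel : Nat) (cs : List Char) (acc : Nat)
    (h : cs.length ≤ fuel) :
    PySem.Chars.count.go [c] fuel cs acc = acc + cs.count c := by
  induction fuel generalizing cs acc with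
  | zero =>
    have : cs = [] := List.eq_nil_of_length_eq_zero (Nat.le_zero.mp h)
    subst this
    simp [PySem.Chars.count.go]
  | succ fuel ih =>
    cases cs with
    | nil => simp [PySem.Chars.count.go]
    | cons x t =>
      simp only [PySem.Chars.count.go]
      by_cases hx : x = c
      · subst hx
        have hp : List.isPrefixOf [x] (x :: t) = true := by
          simp [List.isPrefixOf]
        simp only [hp, if_pos]
        rw [ih]
        · simp only [List.length_cons, List.length_nil, List.drop_succ_cons, List.drop_zero, List.count_cons_self]
          omega
        · simpa using Nat.le_of_succ_le_succ h
      · have hp : List.isPrefixOf [c] (x :: t) = false := by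
          simp [List.isPrefixOf]
          exact fun hc => absurd hc.symm hx
        simp only [hp]
        rw [ih t acc (Nat.le_of_succ_le_succ h)]
        simp [hx]

theorem chars_count_single (c : Char) (cs : List Char) :
    PySem.Chars.count cs [c] = cs.count c := by
  rw [PySem.Chars.count]
  simp only [List.isEmpty]
  rw [chars_count_go_single c cs.length cs 0 (le_refl _)]
  simp

-- A's accumulator loop in closed form
theorem foldl_updown (cs : List Char) (a : Int) :
    cs.foldl (fun now c => if c == 'U' then now + 1 else now - 1) a
      = a + 2 * (cs.count 'U' : Int) - cs.length := by
  induction cs generalizing a with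
  | nil => simp
  | cons x t ih =>
    simp only [List.foldl_cons, ih, List.count_cons, List.length_cons]
    by_cases hx : x = 'U' <;> simp [hx] <;> ring

-- ===== VERDICT (by name: the statement is the Claim_ definition above) =====
theorem calculate_floor_spec : Claim_equal_calculate_floor := by
  intro s _
  unfold Spec_calculate_floor calculate_floor calculate_floor_alt
  rw [foldl_updown, PySem.Str.count_eq, PySem.Str.len_eq]
  have : ("U" : String).toList = ['U'] := rfl
  rw [this, chars_count_single]
  ring
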